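-- pv_equiv track=rewrite | github.com/sureshlc/goldfinger | Backend/app/services/production_service.py | consolidate_shortages
-- ===== SOURCE A (Python) =====
-- from typing import List, Dict, Optional, Tuple
--
-- def consolidate_shortages(shortages: List[Dict]) -> List[Dict]:
--     consolidated = {}
--     for shortage in shortages:
--         item_id = shortage["item_id"]
--         if item_id not in consolidated:
--             consolidated[item_id] = shortage
--         else:
--             existing_qty = consolidated[item_id].get("shortage_quantity", 0)
--             additional_qty = shortage.get("shortage_quantity", 0)
--             consolidated[item_id]["shortage_quantity"] = existing_qty + additional_qty
--             if "required_quantity" in shortage: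
--                 existing_req = consolidated[item_id].get("required_quantity", 0)
--                 consolidated[item_id]["required_quantity"] = existing_req + shortage["required_quantity"]
--     return list(consolidated.values())
-- ===== SOURCE B (Python) =====
-- def consolidate_shortages(shortages):
--     # Pass 1: group shortages by item_id, keeping first-occurrence order.
--     groups = {}
--     for shortage in shortages:
--         groups.setdefault(shortage["item_id"], []).append(shortage)
--     # Pass 2: fold each group into its first dict (mutated in place, like A).
--     result = []
--     for group in groups.values():
--         base = group[0]
--         for extra in group[1:]:
--             base["shortage_quantity"] = base.get("shortage_quantity", 0) + extra.get("shortage_quantity", 0)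
--             if "required_quantity" in extra:
--                 base["required_quantity"] = base.get("required_quantity", 0) + extra["required_quantity"]
--         result.append(base)
--     return result
-- ===== Notes on version B (the rewrite author's own statement) =====
-- stated objective: alternative
-- what changed: Replaces A's single merge-as-you-go loop over a consolidated dict with two passes: first group shortages into ordered per-item_id lists via setdefault, then fold each group into its first dict.
import Mathlib
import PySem

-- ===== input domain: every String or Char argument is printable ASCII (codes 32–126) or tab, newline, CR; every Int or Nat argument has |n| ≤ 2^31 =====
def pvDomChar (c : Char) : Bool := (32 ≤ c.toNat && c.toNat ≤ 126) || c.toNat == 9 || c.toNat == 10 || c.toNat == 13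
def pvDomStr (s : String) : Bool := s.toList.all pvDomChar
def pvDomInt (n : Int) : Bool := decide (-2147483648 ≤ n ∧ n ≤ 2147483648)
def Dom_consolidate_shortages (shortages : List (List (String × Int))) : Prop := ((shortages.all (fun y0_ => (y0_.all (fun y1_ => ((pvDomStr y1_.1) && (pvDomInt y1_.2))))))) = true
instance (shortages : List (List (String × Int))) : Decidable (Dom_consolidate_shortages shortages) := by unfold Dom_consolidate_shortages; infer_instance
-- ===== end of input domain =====

-- B is an alternative decomposition (group first, then fold each group); same return value.
-- Both Pythons mutate the first-seen dict of each item_id in place; the theorems are about the RETURN value.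

-- ===== PORT A =====
-- one iteration of A's loop over `shortages` (state = the `consolidated` dict)
def csStepA (acc : PySem.Dict Int (PySem.Dict String Int)) (sl : List (String × Int)) :
    PySem.Dict Int (PySem.Dict String Int) :=
  match (PySem.Dict.ofList sl).get? "item_id" with
  | none => acc            -- Python raises KeyError here; excluded by Pre_
  | some item_id =>
    if acc.contains item_id = false then
      acc.insert item_id (PySem.Dict.ofList sl)
    else
      let existing := acc.getD item_id PySem.Dict.empty
      let existing_qty := existing.getD "shortage_quantity" 0
      let additional_qty := (PySem.Dict.ofList sl).getD "shortage_quantity" 0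
      let ex1 := existing.insert "shortage_quantity" (existing_qty + additional_qty)
      let ex2 :=
        if (PySem.Dict.ofList sl).contains "required_quantity" then
          ex1.insert "required_quantity" (ex1.getD "required_quantity" 0 + (PySem.Dict.ofList sl).getD "required_quantity" 0)
        else ex1
      acc.insert item_id ex2

def consolidate_shortages (shortages : List (List (String × Int))) : List (List (String × Int)) :=
  ((shortages.foldl csStepA PySem.Dict.empty).values).map (fun d => d.items)

-- ===== PORT B =====
-- pass 1 step: groups.setdefault(item_id, []).append(shortage)
def csStepG (g : PySem.Dict Int (List (PySem.Dict String Int))) (sl : List (String × Int)) :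
    PySem.Dict Int (List (PySem.Dict String Int)) :=
  match (PySem.Dict.ofList sl).get? "item_id" with
  | none => g              -- Python raises KeyError here; excluded by Pre_
  | some item_id => g.insert item_id (g.getD item_id [] ++ [PySem.Dict.ofList sl])

-- pass 2 inner step: fold one extra shortage into the base dict
def csMerge (base : PySem.Dict String Int) (s : PySem.Dict String Int) : PySem.Dict String Int :=
  let b1 := base.insert "shortage_quantity" (base.getD "shortage_quantity" 0 + s.getD "shortage_quantity" 0)
  if s.contains "required_quantity" then
    b1.insert "required_quantity" (b1.getD "required_quantity" 0 + s.getD "required_quantity" 0)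
  else b1

def consolidate_shortages_alt (shortages : List (List (String × Int))) : List (List (String × Int)) :=
  let groups := shortages.foldl csStepG PySem.Dict.empty
  groups.values.map (fun group =>
    match group with
    | [] => []                                   -- unreachable: groups' values are nonempty
    | base :: rest => (rest.foldl csMerge base).items)

-- ===== PRECONDITION & SPEC =====
-- Pre_ excludes exactly the inputs on which A's `shortage["item_id"]` raises KeyError.
def Pre_consolidate_shortages (shortages : List (List (String × Int))) : Prop :=
  ∀ sl ∈ shortages, "item_id" ∈ sl.map Prod.fst
instance (shortages : List (List (String × Int))) : Decidable (Pre_consolidate_shortages shortages) := by unfold Pre_consolidate_shortages; infer_instance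

def pvWitness_consolidate_shortages : (List (List (String × Int))) :=
  [[("item_id", 1), ("shortage_quantity", 2)], [("item_id", 1), ("shortage_quantity", 3), ("required_quantity", 5)]]

def Spec_consolidate_shortages (shortages : List (List (String × Int))) (out : List (List (String × Int))) : Prop := out = consolidate_shortages_alt shortages
instance (shortages : List (List (String × Int))) (out : List (List (String × Int))) : Decidable (Spec_consolidate_shortages shortages out) := by unfold Spec_consolidate_shortages; infer_instance

-- ===== CLAIM (what is proved, stated in full; the proofs are below) =====
def Claim_equal_consolidate_shortages : Prop := ∀ (shortages : List (List (String × Int))), Dom_consolidate_shortages shortages → Pre_consolidate_shortages shortages → Spec_consolidate_shortages shortages (consolidate_shortages shortages)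

-- ===== LEMMAS AND PROOFS =====

-- fold a whole group into its head (B's inner loop); [] only as a technical default
def csMG (group : List (PySem.Dict String Int)) : PySem.Dict String Int :=
  match group with
  | [] => PySem.Dict.empty
  | base :: rest => rest.foldl csMerge base

-- B's groups dict, with every value folded down: this IS A's consolidated dict
def csMapD (g : PySem.Dict Int (List (PySem.Dict String Int))) : PySem.Dict Int (PySem.Dict String Int) :=
  PySem.Dict.mk (g.items.map (fun p => (p.1, csMG p.2)))

lemma csMapD_items (g : PySem.Dict Int (List (PySem.Dict String Int))) :
    (csMapD g).items = g.items.map (fun p => (p.1, csMG p.2)) := rfl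

lemma csMapD_get? (g : PySem.Dict Int (List (PySem.Dict String Int))) (k : Int) :
    (csMapD g).get? k = (g.get? k).map csMG := by
  obtain ⟨l⟩ := g
  induction l with
  | nil => rfl
  | cons p rest ih =>
    obtain ⟨a, b⟩ := p
    simp only [csMapD, List.map_cons, PySem.Dict.get?_mk_cons] at *
    by_cases h : a == k <;> simp [h, ih]

lemma csMapD_contains (g : PySem.Dict Int (List (PySem.Dict String Int))) (k : Int) :
    (csMapD g).contains k = g.contains k := by
  rw [PySem.Dict.contains_eq_isSome_get?, PySem.Dict.contains_eq_isSome_get?, csMapD_get?]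
  cases g.get? k <;> rfl

lemma csMapD_insert (g : PySem.Dict Int (List (PySem.Dict String Int))) (k : Int)
    (v : List (PySem.Dict String Int)) :
    csMapD (g.insert k v) = (csMapD g).insert k (csMG v) := by
  apply PySem.Dict.ext
  by_cases h : g.contains k = true
  · rw [PySem.Dict.items_insert_of_contains (csMapD g) (csMG v) (by rw [csMapD_contains]; exact h),
        csMapD_items, csMapD_items, PySem.Dict.items_insert_of_contains g v h,
        List.map_map, List.map_map]
    apply List.map_congr_left
    intro p _
    by_cases hp : p.1 == k <;> simp [hp, Function.comp]
  · rw [PySem.Dict.items_insert_of_not_contains (csMapD g) (csMG v)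
          (by rw [csMapD_contains]; simpa using h),
        csMapD_items, csMapD_items, PySem.Dict.items_insert_of_not_contains g v (by simpa using h),
        List.map_append]
    rfl

lemma csMG_append_singleton (group : List (PySem.Dict String Int)) (hne : group ≠ [])
    (s : PySem.Dict String Int) : csMG (group ++ [s]) = csMerge (csMG group) s := by
  cases group with
  | nil => exact absurd rfl hne
  | cons b r => simp [csMG, List.foldl_append]

-- values of groups are nonempty, preserved through csStepG
def csNE (g : PySem.Dict Int (List (PySem.Dict String Int))) : Prop :=
  ∀ p ∈ g.items, p.2 ≠ []

lemma csStepG_NE (g : PySem.Dict Int (List (PySem.Dict String Int))) (sl : List (String × Int))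
    (h : csNE g) : csNE (csStepG g sl) := by
  unfold csStepG
  cases hk : (PySem.Dict.ofList sl).get? "item_id" with
  | none => exact h
  | some k =>
    dsimp only
    intro p hp
    rcases (PySem.Dict.mem_items_insert _ _ _ _).1 hp with rfl | ⟨hp', _⟩
    · simp
    · exact h _ hp'

-- one step commutes: A's step on the folded dict = fold of B's step
lemma cs_step_comm (g : PySem.Dict Int (List (PySem.Dict String Int))) (sl : List (String × Int))
    (hne : csNE g) : csStepA (csMapD g) sl = csMapD (csStepG g sl) := by
  unfold csStepA csStepG
  cases hk : (PySem.Dict.ofList sl).get? "item_id" with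
  | none => rfl
  | some k =>
    dsimp only
    simp only [csMapD_contains]
    by_cases hc : g.contains k
    · simp only [hc, Bool.true_eq_false, if_false]
      cases hv : g.get? k with
      | none =>
        rw [PySem.Dict.contains_eq_isSome_get?, hv] at hc; simp at hc
      | some v =>
        have hvne : v ≠ [] := hne _ (PySem.Dict.mem_items_of_get?_eq_some _ hv)
        have h1 : (csMapD g).getD k PySem.Dict.empty = csMG v :=
          PySem.Dict.getD_of_get?_eq_some (csMapD g) PySem.Dict.empty (by rw [csMapD_get?, hv]; rfl)
        have h2 : g.getD k [] = v := PySem.Dict.getD_of_get?_eq_some g [] hv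
        rw [csMapD_insert, h1, h2, csMG_append_singleton v hvne]
        rfl
    · simp only [Bool.not_eq_true] at hc
      have h2 : g.getD k [] = [] := PySem.Dict.getD_of_not_contains g [] hc
      simp only [hc, h2, List.nil_append, if_true, Bool.false_eq_true]
      rw [csMapD_insert]
      rfl

lemma cs_fold_comm (xs : List (List (String × Int))) (g : PySem.Dict Int (List (PySem.Dict String Int)))
    (hne : csNE g) : xs.foldl csStepA (csMapD g) = csMapD (xs.foldl csStepG g) := by
  induction xs generalizing g with
  | nil => rfl
  | cons x xs ih =>
    simp only [List.foldl_cons, cs_step_comm g x hne]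
    exact ih _ (csStepG_NE g x hne)

lemma csMapD_values (g : PySem.Dict Int (List (PySem.Dict String Int))) :
    (csMapD g).values = g.values.map csMG := by
  simp [csMapD, PySem.Dict.values, List.map_map, Function.comp]

-- ===== VERDICT (by name: the statement is the Claim_ definition above) =====
theorem consolidate_shortages_spec : Claim_equal_consolidate_shortages := by
  intro shortages _ _
  unfold Spec_consolidate_shortages consolidate_shortages consolidate_shortages_alt
  have h0 : csNE PySem.Dict.empty := by intro p hp; simp [PySem.Dict.empty] at hp
  have : (PySem.Dict.empty : PySem.Dict Int (PySem.Dict String Int)) = csMapD PySem.Dict.empty := rfl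
  rw [this, cs_fold_comm shortages PySem.Dict.empty h0, csMapD_values, List.map_map]
  apply List.map_congr_left
  intro group _
  cases group with
  | nil => rfl
  | cons b r => simp [csMG, Function.comp]
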